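-- pv_equiv track=rewrite | github.com/NicoleFarina00/BWT-and-REVERSE-BWT | bwt_utils.py | calc_counting
-- ===== SOURCE A (Python) =====
-- def calc_counting(lex_order, bwt):
--     #Calculate the counting cof each character
--     counts = {char: 0 for char in lex_order}
--     sorted_bwt = sorted(bwt.lower())
--
--     for char in sorted_bwt:
--         counts[char] += 1
--
--     counting = {}
--     cumulative = 0
--
--     for char in sorted(counts):
--         counting[char] = cumulative
--         cumulative += counts[char]
--
--     return counting
-- ===== SOURCE B (Python) =====
-- def calc_counting(lex_order, bwt):
--     counts = {char: 0 for char in lex_order}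
--     for char in bwt.lower():
--         counts[char] += 1
--     return {char: sum(counts[c] for c in counts if c < char)
--             for char in sorted(counts)}
-- ===== Notes on version B (the rewrite author's own statement) =====
-- stated objective: simpler
-- what changed: B drops the useless sort of bwt and the running cumulative accumulator: each offset is computed independently as the sum of counts of all lexicographically smaller characters, in a dict comprehension.
import Mathlib
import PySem

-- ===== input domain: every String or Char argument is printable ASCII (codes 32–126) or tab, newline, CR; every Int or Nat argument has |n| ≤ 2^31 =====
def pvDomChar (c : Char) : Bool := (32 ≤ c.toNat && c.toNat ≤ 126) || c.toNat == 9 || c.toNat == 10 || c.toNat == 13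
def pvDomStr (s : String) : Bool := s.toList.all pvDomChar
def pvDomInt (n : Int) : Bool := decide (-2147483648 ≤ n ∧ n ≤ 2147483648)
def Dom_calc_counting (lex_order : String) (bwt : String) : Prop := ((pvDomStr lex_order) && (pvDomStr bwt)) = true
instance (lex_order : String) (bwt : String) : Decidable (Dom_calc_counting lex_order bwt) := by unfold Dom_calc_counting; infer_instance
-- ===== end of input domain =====

-- B replaces A's useless sort of bwt and A's running cumulative accumulator: each offset is
-- computed independently as the sum of counts of all lexicographically smaller characters (simpler).

-- ===== PORT A =====
def calc_counting (lex_order : String) (bwt : String) : List (String × Int) :=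
  let counts : PySem.Dict Char Int :=
    lex_order.toList.foldl (fun d c => d.insert c 0) PySem.Dict.empty
  let sorted_bwt := PySem.List.sorted (PySem.Chars.lower bwt.toList) (fun c => c) false
  let counts := sorted_bwt.foldl (fun d c => d.modify c 0 (· + 1)) counts
  let counting :=
    (PySem.List.sorted counts.keys (fun c => c) false).foldl
      (fun (p : PySem.Dict Char Int × Int) c => (p.1.insert c p.2, p.2 + counts.getD c 0))
      (PySem.Dict.empty, (0 : Int))
  counting.1.items.map (fun p => (String.ofList [p.1], p.2))

-- ===== PORT B =====
def calc_counting_alt (lex_order : String) (bwt : String) : List (String × Int) :=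
  let counts : PySem.Dict Char Int :=
    lex_order.toList.foldl (fun d c => d.insert c 0) PySem.Dict.empty
  let counts := (PySem.Chars.lower bwt.toList).foldl (fun d c => d.modify c 0 (· + 1)) counts
  (PySem.List.sorted counts.keys (fun c => c) false).map
    (fun ch => (String.ofList [ch],
      ((counts.items.filter (fun p => decide (p.1 < ch))).map (·.2)).sum))

-- ===== PRECONDITION & SPEC =====
-- Pre_ excludes exactly the inputs where Python A (and Python B alike) raises KeyError:
-- some character of bwt.lower() is not a character of lex_order.
def Pre_calc_counting (lex_order : String) (bwt : String) : Prop :=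
  ((PySem.Chars.lower bwt.toList).all (fun c => lex_order.toList.contains c)) = true
instance (lex_order : String) (bwt : String) : Decidable (Pre_calc_counting lex_order bwt) := by
  unfold Pre_calc_counting; infer_instance

def pvWitness_calc_counting : String × String := ("ban$", "nnb$aa")

def Spec_calc_counting (lex_order : String) (bwt : String) (out : List (String × Int)) : Prop := out = calc_counting_alt lex_order bwt
instance (lex_order : String) (bwt : String) (out : List (String × Int)) : Decidable (Spec_calc_counting lex_order bwt out) := by unfold Spec_calc_counting; infer_instance

-- ===== CLAIM (what is proved, stated in full; the proofs are below) =====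
def Claim_equal_calc_counting : Prop := ∀ (lex_order : String) (bwt : String), Dom_calc_counting lex_order bwt → Pre_calc_counting lex_order bwt → Spec_calc_counting lex_order bwt (calc_counting lex_order bwt)

-- ===== LEMMAS AND PROOFS =====

-- updating a set with elements it already has is a no-op
theorem pvSetUpdate_self (s : List Char) : ∀ l : List Char, (∀ x ∈ l, x ∈ s) → PySem.Set.update s l = s := by
  intro l
  induction l generalizing s with
  | nil => intro _; rfl
  | cons x t ih =>
    intro h
    rw [PySem.Set.update_cons, PySem.Set.add_of_mem (h x (by simp))]
    exact ih s (fun y hy => h y (List.mem_cons_of_mem _ hy))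

-- counting by dict-modify over a permutation of a list of already-present keys gives the same dict
theorem pvCountsPerm (d : PySem.Dict Char Int) (l₁ l₂ : List Char) (hp : l₁.Perm l₂)
    (hin : ∀ c ∈ l₁, c ∈ d.keys) (hnd : d.keys.Nodup) :
    l₁.foldl (fun d c => d.modify c 0 (· + 1)) d = l₂.foldl (fun d c => d.modify c 0 (· + 1)) d := by
  have hk1 : (l₁.foldl (fun d c => d.modify c 0 (· + 1)) d).keys = d.keys := by
    rw [show (fun (d : PySem.Dict Char Int) c => d.modify c 0 (· + 1))
          = (fun (d : PySem.Dict Char Int) c => d.modify c 0 ((fun _ _ => (· + 1)) d c)) from rfl,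
        PySem.Dict.keys_foldl_modify]
    exact pvSetUpdate_self d.keys l₁ hin
  have hk2 : (l₂.foldl (fun d c => d.modify c 0 (· + 1)) d).keys = d.keys := by
    rw [show (fun (d : PySem.Dict Char Int) c => d.modify c 0 (· + 1))
          = (fun (d : PySem.Dict Char Int) c => d.modify c 0 ((fun _ _ => (· + 1)) d c)) from rfl,
        PySem.Dict.keys_foldl_modify]
    exact pvSetUpdate_self d.keys l₂ (fun c hc => hin c (hp.mem_iff.mpr hc))
  apply PySem.Dict.ext
  rw [PySem.Dict.items_eq_map_keys _ (by rw [hk1]; exact hnd) 0,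
      PySem.Dict.items_eq_map_keys _ (by rw [hk2]; exact hnd) 0, hk1, hk2]
  apply List.map_congr_left
  intro k _
  rw [PySem.Dict.getD_foldl_modify_add_one, PySem.Dict.getD_foldl_modify_add_one, hp.count_eq]

-- the items list produced by A's cumulative loop, written as a recursion
def pvPrefix (g : Char → Int) : List Char → Int → List (Char × Int)
  | [], _ => []
  | k :: t, cum => (k, cum) :: pvPrefix g t (cum + g k)

theorem pvFoldlItems (g : Char → Int) :
    ∀ (ks : List Char) (acc : PySem.Dict Char Int) (cum : Int),
      ks.Nodup → (∀ k ∈ ks, acc.contains k = false) →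
      (ks.foldl (fun (p : PySem.Dict Char Int × Int) c => (p.1.insert c p.2, p.2 + g c))
        (acc, cum)).1.items = acc.items ++ pvPrefix g ks cum := by
  intro ks
  induction ks with
  | nil => intro acc cum _ _; simp [pvPrefix]
  | cons k t ih =>
    intro acc cum hnd hfr
    simp only [List.foldl_cons, pvPrefix]
    have hk : acc.contains k = false := hfr k (by simp)
    have hfr' : ∀ k' ∈ t, (acc.insert k cum).contains k' = false := by
      intro k' hk'
      have hne : k' ≠ k := by
        intro h; exact (List.nodup_cons.mp hnd).1 (h ▸ hk')
      simp [PySem.Dict.contains_insert, hne, hfr k' (List.mem_cons_of_mem _ hk')]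
    rw [ih (acc.insert k cum) (cum + g k) (List.nodup_cons.mp hnd).2 hfr',
        PySem.Dict.items_insert_of_not_contains (h := hk)]
    simp

theorem pvPrefixEqMap (g : Char → Int) :
    ∀ (ks : List Char), ks.Pairwise (· < ·) → ∀ (cum : Int),
      pvPrefix g ks cum
        = ks.map (fun ch => (ch, cum + ((ks.filter (fun k => decide (k < ch))).map g).sum)) := by
  intro ks
  induction ks with
  | nil => intro _ _; simp [pvPrefix]
  | cons k t ih =>
    intro hpw cum
    have hkt : ∀ y ∈ t, k < y := fun y hy => List.rel_of_pairwise_cons hpw hy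
    have hpt : t.Pairwise (· < ·) := hpw.of_cons
    simp only [pvPrefix, List.map_cons]
    congr 1
    · -- head entry: no key of k :: t is < k
      have hnil : (k :: t).filter (fun x => decide (x < k)) = [] := by
        rw [List.filter_eq_nil_iff]
        intro a ha
        rcases List.mem_cons.mp ha with h | h
        · simp [h]
        · simp [not_lt_of_gt (hkt a h)]
      simp [hnil]
    · rw [ih hpt (cum + g k)]
      apply List.map_congr_left
      intro ch hch
      have hkch : k < ch := hkt ch hch
      have hf : (k :: t).filter (fun x => decide (x < ch))
          = k :: t.filter (fun x => decide (x < ch)) := by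
        simp [hkch]
      simp only [hf, List.map_cons, List.sum_cons]
      congr 1
      ring

-- the second stage: A's cumulative loop over sorted keys vs B's per-key sums, for any count dict
theorem pvStage (d : PySem.Dict Char Int) (hnd : d.keys.Nodup) :
    ((PySem.List.sorted d.keys (fun c => c) false).foldl
        (fun (p : PySem.Dict Char Int × Int) c => (p.1.insert c p.2, p.2 + d.getD c 0))
        (PySem.Dict.empty, (0 : Int))).1.items.map (fun p => (String.ofList [p.1], p.2))
      = (PySem.List.sorted d.keys (fun c => c) false).map
          (fun ch => (String.ofList [ch],
            ((d.items.filter (fun p => decide (p.1 < ch))).map (·.2)).sum)) := by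
  set ks := PySem.List.sorted d.keys (fun c => c) false with hks
  have hperm : ks.Perm d.keys := PySem.List.sorted_perm _ _ _
  have hksnd : ks.Nodup := hperm.nodup_iff.mpr hnd
  have hpw : ks.Pairwise (· < ·) := by
    have h1 : ks.Pairwise (fun a b : Char => a ≤ b) := PySem.List.sorted_pairwise _ _
    have h2 : ks.Pairwise (fun a b : Char => a ≠ b) := hksnd
    exact (h1.and h2).imp (fun h => lt_of_le_of_ne h.1 h.2)
  rw [pvFoldlItems (fun k => d.getD k 0) ks PySem.Dict.empty 0 hksnd
        (fun k _ => PySem.Dict.contains_empty k),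
      pvPrefixEqMap (fun k => d.getD k 0) ks hpw 0]
  simp only [show (PySem.Dict.empty : PySem.Dict Char Int).items = [] from rfl, List.nil_append, List.map_map]
  apply List.map_congr_left
  intro ch _
  simp only [Function.comp]
  congr 1
  rw [PySem.Dict.items_eq_map_keys d hnd 0, List.filter_map, List.map_map]
  have hfp : (ks.filter (fun k => decide (k < ch))).Perm
      (d.keys.filter (fun k => decide (k < ch))) := hperm.filter _
  rw [(hfp.map (fun k => d.getD k 0)).sum_eq]
  simp
  rfl

theorem calc_counting_eq (lex_order : String) (bwt : String)
    (hpre : Pre_calc_counting lex_order bwt) :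
    calc_counting lex_order bwt = calc_counting_alt lex_order bwt := by
  unfold calc_counting calc_counting_alt
  simp only []
  have hnd0 : ((lex_order.toList.foldl (fun d c => d.insert c 0)
      (PySem.Dict.empty : PySem.Dict Char Int))).keys.Nodup :=
    PySem.Dict.nodup_keys_foldl_insert _ _ _ PySem.Dict.nodup_keys_empty
  have hkeys0 : ((lex_order.toList.foldl (fun d c => d.insert c 0)
      (PySem.Dict.empty : PySem.Dict Char Int))).keys = PySem.Set.ofList lex_order.toList := by
    rw [show (fun (d : PySem.Dict Char Int) c => d.insert c 0)
          = (fun (d : PySem.Dict Char Int) c => d.insert c ((fun _ _ => (0:Int)) d c)) from rfl,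
        PySem.Dict.keys_foldl_insert]
    rfl
  have hp : (PySem.List.sorted (PySem.Chars.lower bwt.toList) (fun c => c) false).Perm
      (PySem.Chars.lower bwt.toList) := PySem.List.sorted_perm _ _ _
  rw [pvCountsPerm _ _ _ hp
      (fun c hc => by
        rw [hkeys0, PySem.Set.mem_ofList]
        have := List.all_eq_true.mp hpre c (hp.mem_iff.mp hc)
        simpa using this)
      hnd0]
  have hnd : ((PySem.Chars.lower bwt.toList).foldl (fun d c => d.modify c 0 (· + 1))
      (lex_order.toList.foldl (fun d c => d.insert c 0)
        (PySem.Dict.empty : PySem.Dict Char Int))).keys.Nodup :=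
    PySem.Dict.nodup_keys_foldl_modify_key _ (fun x => x) 0 (fun _ _ => (· + 1)) _ hnd0
  exact pvStage _ hnd

-- ===== VERDICT (by name: the statement is the Claim_ definition above) =====
theorem calc_counting_spec : Claim_equal_calc_counting := by
  intro lex_order bwt _ hpre
  unfold Spec_calc_counting
  exact calc_counting_eq lex_order bwt hpre
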